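-- pv_equiv track=rewrite | github.com/MPSU-IT-Department/MPSU-Facial-Recognition-Attendance-System | client/client.py | extract_schedule_days
-- ===== SOURCE A (Python) =====
-- def extract_schedule_days(schedule_string):
--     """Extract day tokens (M, T, W, Th, F, S, Su) from a schedule string."""
--     if not schedule_string:
--         return set()
--     days_found = set()
--     for slot in schedule_string.split(','):
--         slot = slot.strip()
--         if not slot:
--             continue
--         parts = slot.split(' ', 1)
--         if not parts:
--             continue
--         days_part = parts[0]
--         idx = 0
--         while idx < len(days_part):
--             if days_part[idx:idx + 2] in ('Th', 'Su'):
--                 days_found.add(days_part[idx:idx + 2])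
--                 idx += 2
--             else:
--                 days_found.add(days_part[idx])
--                 idx += 1
--     return days_found
-- ===== SOURCE B (Python) =====
-- def extract_schedule_days(schedule_string):
--     """Extract day tokens (M, T, W, Th, F, S, Su) from a schedule string."""
--     # Stateless per-position classification: 'Th'/'Su' never overlap themselves
--     # or each other, so every occurrence is a token and a character is a
--     # single-char token exactly when it is not inside such an occurrence.
--     days_found = set()
--     for slot in schedule_string.split(','):
--         part = slot.strip().split(' ', 1)[0]
--         for i, ch in enumerate(part):
--             pair = part[i:i + 2]
--             if pair in ('Th', 'Su'):
--                 days_found.add(pair)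
--             elif i > 0 and part[i - 1:i + 1] in ('Th', 'Su'):
--                 continue  # second character of a matched token
--             else:
--                 days_found.add(ch)
--     return days_found
-- ===== Notes on version B (the rewrite author's own statement) =====
-- stated objective: alternative
-- what changed: Replaces A's stateful greedy scanner (an index that jumps +2 on a 'Th'/'Su' match, +1 otherwise) with a stateless per-position classification over enumerate(part): since 'Th' and 'Su' can never overlap, a position is a two-char token start iff part[i:i+2] matches, is skipped iff part[i-1:i+1] matches, and is a single-char token otherwise.
import Mathlib
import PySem

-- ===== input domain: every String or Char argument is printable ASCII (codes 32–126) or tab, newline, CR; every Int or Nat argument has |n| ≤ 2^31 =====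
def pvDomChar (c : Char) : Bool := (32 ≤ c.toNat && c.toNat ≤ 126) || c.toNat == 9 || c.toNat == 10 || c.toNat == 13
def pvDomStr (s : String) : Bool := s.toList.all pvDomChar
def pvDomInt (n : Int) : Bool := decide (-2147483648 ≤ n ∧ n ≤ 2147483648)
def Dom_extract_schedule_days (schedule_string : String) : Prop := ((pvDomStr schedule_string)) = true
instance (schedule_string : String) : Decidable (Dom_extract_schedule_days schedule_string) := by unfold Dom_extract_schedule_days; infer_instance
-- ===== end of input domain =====

-- B replaces A's stateful greedy index scanner with a stateless per-position
-- classification (alternative algorithm, same cost); proved to return the same set.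


-- the test `… in ('Th', 'Su')`, shared by both ports
def pvIsDayPair (two : List Char) : Bool := two = ['T', 'h'] || two = ['S', 'u']

-- ===== PORT A =====
-- the `while idx < len(days_part)` scanner: consume 2 chars on a pair match, else 1
def pvScanA : List Char → PySem.Set String → PySem.Set String
  | [], days => days
  | c :: rest, days =>
    if pvIsDayPair ((c :: rest).take 2) then
      pvScanA (rest.drop 1) (PySem.Set.add days (String.ofList ((c :: rest).take 2)))
    else
      pvScanA rest (PySem.Set.add days (String.ofList [c]))
  termination_by cs _ => cs.length
  decreasing_by all_goals simp only [List.length_drop, List.length_cons]; omega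

-- body of A's `for slot in schedule_string.split(',')` loop
def pvSlotA (days : PySem.Set String) (slot : String) : PySem.Set String :=
  if PySem.Str.strip slot = "" then days
  else
    match (PySem.Str.splitMax? (PySem.Str.strip slot) " " 1).getD [] with
    | [] => days
    | days_part :: _ => pvScanA days_part.toList days

def extract_schedule_days (schedule_string : String) : List String :=
  if schedule_string = "" then []
  else ((PySem.Str.split? schedule_string ",").getD []).foldl pvSlotA PySem.Set.empty

-- ===== PORT B =====
-- body of B's `for i, ch in enumerate(part)` loop: classify position i on its own
def pvStepB (part : List Char) (days : PySem.Set String) (p : Int × Char) : PySem.Set String :=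
  if pvIsDayPair (PySem.List.slice part (some p.1) (some (p.1 + 2))) then
    PySem.Set.add days (String.ofList (PySem.List.slice part (some p.1) (some (p.1 + 2))))
  else if decide (0 < p.1) && pvIsDayPair (PySem.List.slice part (some (p.1 - 1)) (some (p.1 + 1))) then
    days
  else PySem.Set.add days (String.ofList [p.2])

-- B's inner loop over enumerate(part)
def pvPartFold (part : List Char) (days : PySem.Set String) : PySem.Set String :=
  (PySem.List.enumerate part 0).foldl (pvStepB part) days

-- body of B's `for slot in schedule_string.split(',')` loop
def pvSlotB (days : PySem.Set String) (slot : String) : PySem.Set String :=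
  pvPartFold ((((PySem.Str.splitMax? (PySem.Str.strip slot) " " 1).getD []).headD "").toList) days

def extract_schedule_days_alt (schedule_string : String) : List String :=
  ((PySem.Str.split? schedule_string ",").getD []).foldl pvSlotB PySem.Set.empty

-- ===== PRECONDITION & SPEC =====
def Spec_extract_schedule_days (schedule_string : String) (out : List String) : Prop := out = extract_schedule_days_alt schedule_string
instance (schedule_string : String) (out : List String) : Decidable (Spec_extract_schedule_days schedule_string out) := by unfold Spec_extract_schedule_days; infer_instance

-- ===== CLAIM (what is proved, stated in full; the proofs are below) =====
def Claim_equal_extract_schedule_days : Prop := ∀ (schedule_string : String), Dom_extract_schedule_days schedule_string → Spec_extract_schedule_days schedule_string (extract_schedule_days schedule_string)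

-- ===== LEMMAS AND PROOFS =====

lemma pvIsDayPair_singleton (c : Char) : pvIsDayPair [c] = false := by
  simp [pvIsDayPair]

-- a pair's second character ('h' or 'u') can never start a pair
lemma pvIsDayPair_take_of_snd (c1 c2 : Char) (l : List Char)
    (h : pvIsDayPair [c1, c2] = true) : pvIsDayPair ((c2 :: l).take 2) = false := by
  have h2 : c2 = 'h' ∨ c2 = 'u' := by
    simp [pvIsDayPair] at h
    rcases h with ⟨_, h⟩ | ⟨_, h⟩ <;> simp [h]
  cases l <;> rcases h2 with h2 | h2 <;> simp [pvIsDayPair, h2]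

lemma pvSlice_take (part : List Char) (k : Nat) :
    PySem.List.slice part (some (k : Int)) (some ((k : Int) + 2)) = (part.drop k).take 2 := by
  have := PySem.List.slice_natCast_add part k 2
  simpa using this

-- evaluate B's step at a natural position k
lemma pvStepB_eval (part : List Char) (k : Nat) (c : Char) (days : PySem.Set String) :
    pvStepB part days ((k : Int), c) =
      if pvIsDayPair ((part.drop k).take 2) then
        PySem.Set.add days (String.ofList ((part.drop k).take 2))
      else if 0 < k ∧ pvIsDayPair ((part.drop (k - 1)).take 2) = true then days
      else PySem.Set.add days (String.ofList [c]) := by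
  simp only [pvStepB, pvSlice_take part k]
  cases k with
  | zero => simp
  | succ n =>
    have e1 : ((n + 1 : Nat) : Int) - 1 = ((n : Nat) : Int) := by push_cast; ring
    have e2 : ((n + 1 : Nat) : Int) + 1 = ((n : Nat) : Int) + 2 := by push_cast; ring
    rw [e1, e2, pvSlice_take part n]
    simp

-- the core equivalence: A's greedy scanner over the suffix from position k agrees
-- with B's per-position fold, provided position k is not the second char of a pair
lemma pvScan_eq_fold (part : List Char) :
    ∀ (m k : Nat) (days : PySem.Set String), part.length - k ≤ m →
    (k = 0 ∨ pvIsDayPair ((part.drop (k - 1)).take 2) = false) →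
    pvScanA (part.drop k) days
      = (PySem.List.enumerate (part.drop k) (k : Int)).foldl (pvStepB part) days := by
  intro m
  induction m with
  | zero =>
    intro k days hm _
    have h : part.drop k = [] := List.drop_eq_nil_of_le (by omega)
    rw [h, pvScanA]
    simp [PySem.List.enumerate]
  | succ m ih =>
    intro k days hm hinv
    cases hdk : part.drop k with
    | nil =>
      rw [pvScanA]
      simp [PySem.List.enumerate]
    | cons c1 rest =>
      have hk : k < part.length := by
        by_contra h
        rw [List.drop_eq_nil_of_le (by omega)] at hdk
        simp at hdk
      have hd1 : part.drop (k + 1) = rest := by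
        have h : part.drop (k + 1) = (part.drop k).drop 1 := by rw [List.drop_drop]
        simp [h, hdk]
      have htk : (part.drop k).take 2 = (c1 :: rest).take 2 := by rw [hdk]
      by_cases hp : pvIsDayPair ((c1 :: rest).take 2) = true
      · -- pair matched: rest must be nonempty
        cases rest with
        | nil => simp [pvIsDayPair_singleton] at hp
        | cons c2 rest' =>
          have hpair : pvIsDayPair [c1, c2] = true := by simpa using hp
          have hd2 : part.drop (k + 2) = rest' := by
            have h : part.drop (k + 2) = (part.drop (k + 1)).drop 1 := by rw [List.drop_drop]
            simp [h, hd1]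
          have hno : pvIsDayPair ((part.drop (k + 1)).take 2) = false := by
            rw [hd1]; exact pvIsDayPair_take_of_snd c1 c2 rest' hpair
          -- A's side: one pair step
          rw [pvScanA, if_pos hp]
          -- B's side: unfold two fold steps
          rw [PySem.List.enumerate_cons, PySem.List.enumerate_cons,
            List.foldl_cons, List.foldl_cons]
          rw [pvStepB_eval part k c1 days, if_pos (htk ▸ hp)]
          have e1 : (k : Int) + 1 = ((k + 1 : Nat) : Int) := by push_cast; ring
          rw [e1, pvStepB_eval part (k + 1) c2]
          rw [if_neg (by simp [hno]), if_pos ⟨Nat.succ_pos k, by simpa using htk ▸ hp⟩]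
          have e2 : ((k + 1 : Nat) : Int) + 1 = ((k + 2 : Nat) : Int) := by push_cast; ring
          rw [e2]
          have hrec := ih (k + 2) (PySem.Set.add days (String.ofList ((part.drop k).take 2)))
            (by omega)
            (Or.inr (by
              have h : k + 2 - 1 = k + 1 := by omega
              rw [h, hd1]
              exact pvIsDayPair_take_of_snd c1 c2 rest' hpair))
          rw [hd2] at hrec
          rw [htk]
          rw [htk] at hrec
          simpa using hrec
      · -- no pair at k: single char token
        have hpf : pvIsDayPair ((c1 :: rest).take 2) = false := by simpa using hp
        rw [pvScanA, if_neg (by simpa using hpf)]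
        rw [PySem.List.enumerate_cons, List.foldl_cons]
        rw [pvStepB_eval part k c1 days, if_neg (by rw [htk]; simpa using hpf)]
        rw [if_neg (by
          rintro ⟨hk0, hprev⟩
          rcases hinv with h0 | h0
          · omega
          · rw [h0] at hprev; simp at hprev)]
        have e1 : (k : Int) + 1 = ((k + 1 : Nat) : Int) := by push_cast; ring
        rw [e1]
        have hrec := ih (k + 1) (PySem.Set.add days (String.ofList [c1]))
          (by omega)
          (Or.inr (by
            have h : k + 1 - 1 = k := by omega
            rw [h, hdk]; exact hpf))
        rw [hd1] at hrec
        exact hrec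

-- Python ''.split(' ', 1) = ['']
lemma pvSplitMax_empty : (PySem.Str.splitMax? "" " " 1).getD [] = [""] := by decide

-- the two per-slot loop bodies agree on every slot
lemma pvSlot_eq : pvSlotA = pvSlotB := by
  funext days slot
  unfold pvSlotA pvSlotB
  by_cases hs : PySem.Str.strip slot = ""
  · rw [hs, if_pos rfl, pvSplitMax_empty]
    simp [pvPartFold]
  · rw [if_neg hs]
    cases hparts : (PySem.Str.splitMax? (PySem.Str.strip slot) " " 1).getD [] with
    | nil => simp [pvPartFold]
    | cons p t =>
      simp only [List.headD_cons]
      have h := pvScan_eq_fold p.toList p.toList.length 0 days (by omega) (Or.inl rfl)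
      simpa [pvPartFold] using h

-- ===== VERDICT (by name: the statement is the Claim_ definition above) =====
theorem extract_schedule_days_spec : Claim_equal_extract_schedule_days := by
  intro s _
  unfold Spec_extract_schedule_days extract_schedule_days extract_schedule_days_alt
  rw [pvSlot_eq]
  by_cases hs : s = ""
  · subst hs; decide
  · rw [if_neg hs]
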